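-- pv_equiv track=rewrite | github.com/w85kramer/elections | scripts/import_primary_results.py | first_names_match
-- ===== SOURCE A (Python) =====
-- NICKNAMES = {
--     'edward': ['ed', 'eddie'], 'william': ['bill', 'will', 'billy', 'willy'],
--     'james': ['jim', 'jimmy', 'jamie'], 'robert': ['bob', 'bobby', 'rob'],
--     'richard': ['rick', 'dick', 'rich'], 'michael': ['mike', 'mikey'],
--     'joseph': ['joe', 'joey'], 'thomas': ['tom', 'tommy'],
--     'charles': ['charlie', 'chuck'], 'christopher': ['chris'],
--     'daniel': ['dan', 'danny'], 'matthew': ['matt'],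
--     'timothy': ['tim', 'timmy'], 'stephen': ['steve'],
--     'steven': ['steve'], 'kenneth': ['ken', 'kenny'],
--     'ronald': ['ron', 'ronnie'], 'donald': ['don', 'donnie'],
--     'benjamin': ['ben'], 'frederick': ['fred', 'freddy'],
--     'gerald': ['jerry'], 'harold': ['hal', 'harry'],
--     'lawrence': ['larry'], 'raymond': ['ray'],
--     'patrick': ['pat'], 'samuel': ['sam'],
--     'katherine': ['kathy', 'kate', 'katie'], 'elizabeth': ['liz', 'beth'],
--     'margaret': ['maggie', 'peggy'], 'patricia': ['pat', 'patty'],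
--     'jennifer': ['jenny', 'jen'], 'deborah': ['deb', 'debbie'],
--     'catherine': ['cathy', 'cat'], 'nancy': ['nan'],
--     'andrew': ['andy', 'drew'], 'anthony': ['tony'],
--     'eugene': ['gene'], 'phillip': ['phil'],
--     'alexander': ['alex'], 'nicholas': ['nick'],
--     'jonathan': ['jon'], 'nathaniel': ['nate', 'nathan'],
--     'theodore': ['ted', 'teddy'], 'walter': ['walt'],
--     'wesley': ['wes'], 'douglas': ['doug'],
--     'franklin': ['frank'], 'francis': ['frank'],
--     'albert': ['al'], 'clifford': ['cliff'],
--     'leonard': ['len', 'lenny'], 'terrence': ['terry'],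
--     'randall': ['randy'], 'mitchell': ['mitch'],
--     'reginald': ['reggie'], 'sylvester': ['sly'],
-- }
--
-- def first_names_match(name1, name2):
--     """Check if two first names match, including nickname lookup."""
--     if name1 == name2:
--         return True
--     if name1[:3] == name2[:3] and len(name1) >= 3 and len(name2) >= 3:
--         return True
--     # Check nickname table both directions
--     for formal, nicks in NICKNAMES.items():
--         all_names = [formal] + nicks
--         if name1 in all_names and name2 in all_names:
--             return True
--     return False
-- ===== SOURCE B (Python) =====
-- NICK_INDEX = {
--     'edward': (0,),
--     'ed': (0,),
--     'eddie': (0,),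
--     'william': (1,),
--     'bill': (1,),
--     'will': (1,),
--     'billy': (1,),
--     'willy': (1,),
--     'james': (2,),
--     'jim': (2,),
--     'jimmy': (2,),
--     'jamie': (2,),
--     'robert': (3,),
--     'bob': (3,),
--     'bobby': (3,),
--     'rob': (3,),
--     'richard': (4,),
--     'rick': (4,),
--     'dick': (4,),
--     'rich': (4,),
--     'michael': (5,),
--     'mike': (5,),
--     'mikey': (5,),
--     'joseph': (6,),
--     'joe': (6,),
--     'joey': (6,),
--     'thomas': (7,),
--     'tom': (7,),
--     'tommy': (7,),
--     'charles': (8,),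
--     'charlie': (8,),
--     'chuck': (8,),
--     'christopher': (9,),
--     'chris': (9,),
--     'daniel': (10,),
--     'dan': (10,),
--     'danny': (10,),
--     'matthew': (11,),
--     'matt': (11,),
--     'timothy': (12,),
--     'tim': (12,),
--     'timmy': (12,),
--     'stephen': (13,),
--     'steve': (13, 14),
--     'steven': (14,),
--     'kenneth': (15,),
--     'ken': (15,),
--     'kenny': (15,),
--     'ronald': (16,),
--     'ron': (16,),
--     'ronnie': (16,),
--     'donald': (17,),
--     'don': (17,),
--     'donnie': (17,),
--     'benjamin': (18,),
--     'ben': (18,),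
--     'frederick': (19,),
--     'fred': (19,),
--     'freddy': (19,),
--     'gerald': (20,),
--     'jerry': (20,),
--     'harold': (21,),
--     'hal': (21,),
--     'harry': (21,),
--     'lawrence': (22,),
--     'larry': (22,),
--     'raymond': (23,),
--     'ray': (23,),
--     'patrick': (24,),
--     'pat': (24, 29),
--     'samuel': (25,),
--     'sam': (25,),
--     'katherine': (26,),
--     'kathy': (26,),
--     'kate': (26,),
--     'katie': (26,),
--     'elizabeth': (27,),
--     'liz': (27,),
--     'beth': (27,),
--     'margaret': (28,),
--     'maggie': (28,),
--     'peggy': (28,),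
--     'patricia': (29,),
--     'patty': (29,),
--     'jennifer': (30,),
--     'jenny': (30,),
--     'jen': (30,),
--     'deborah': (31,),
--     'deb': (31,),
--     'debbie': (31,),
--     'catherine': (32,),
--     'cathy': (32,),
--     'cat': (32,),
--     'nancy': (33,),
--     'nan': (33,),
--     'andrew': (34,),
--     'andy': (34,),
--     'drew': (34,),
--     'anthony': (35,),
--     'tony': (35,),
--     'eugene': (36,),
--     'gene': (36,),
--     'phillip': (37,),
--     'phil': (37,),
--     'alexander': (38,),
--     'alex': (38,),
--     'nicholas': (39,),
--     'nick': (39,),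
--     'jonathan': (40,),
--     'jon': (40,),
--     'nathaniel': (41,),
--     'nate': (41,),
--     'nathan': (41,),
--     'theodore': (42,),
--     'ted': (42,),
--     'teddy': (42,),
--     'walter': (43,),
--     'walt': (43,),
--     'wesley': (44,),
--     'wes': (44,),
--     'douglas': (45,),
--     'doug': (45,),
--     'franklin': (46,),
--     'frank': (46, 47),
--     'francis': (47,),
--     'albert': (48,),
--     'al': (48,),
--     'clifford': (49,),
--     'cliff': (49,),
--     'leonard': (50,),
--     'len': (50,),
--     'lenny': (50,),
--     'terrence': (51,),
--     'terry': (51,),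
--     'randall': (52,),
--     'randy': (52,),
--     'mitchell': (53,),
--     'mitch': (53,),
--     'reginald': (54,),
--     'reggie': (54,),
--     'sylvester': (55,),
--     'sly': (55,),
-- }
--
-- def first_names_match(name1, name2):
--     """Check if two first names match, including nickname lookup."""
--     g1 = NICK_INDEX.get(name1, ())
--     g2 = NICK_INDEX.get(name2, ())
--     return (name1 == name2
--             or (len(name1) >= 3 and name2.startswith(name1[:3]))
--             or any(i in g2 for i in g1))
-- ===== Notes on version B (the rewrite author's own statement) =====
-- stated objective: idiomatic
-- what changed: Replaces the per-call scan over all nickname groups with a precomputed literal inverted index (name -> list of group ids) queried by two dict lookups plus an any-intersection, and replaces the if/return chain and slice-equality guard with a single boolean expression using startswith.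
import Mathlib
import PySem

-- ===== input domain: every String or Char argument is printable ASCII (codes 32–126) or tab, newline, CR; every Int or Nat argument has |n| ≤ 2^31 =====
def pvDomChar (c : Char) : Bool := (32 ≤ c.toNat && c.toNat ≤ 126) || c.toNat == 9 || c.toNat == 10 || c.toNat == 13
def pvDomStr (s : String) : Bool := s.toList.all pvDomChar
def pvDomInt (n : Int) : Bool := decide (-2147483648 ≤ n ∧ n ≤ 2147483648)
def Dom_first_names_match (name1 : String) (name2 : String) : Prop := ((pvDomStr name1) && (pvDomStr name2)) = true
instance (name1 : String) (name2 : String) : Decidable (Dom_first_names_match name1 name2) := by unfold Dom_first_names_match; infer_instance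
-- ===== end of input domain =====

-- B replaces the per-call scan over all nickname groups with a precomputed literal inverted
-- index (name -> list of group ids) and an or-expression with a startswith prefix test: an
-- idiomatic data-structure change (return value proved equal; no speed claim).


-- ===== PORT A =====
-- the module-level NICKNAMES dict of A, as its (key, value) items
def NICKNAMES : List (String × List String) := [
  ("edward", ["ed", "eddie"]), ("william", ["bill", "will", "billy", "willy"]),
  ("james", ["jim", "jimmy", "jamie"]), ("robert", ["bob", "bobby", "rob"]),
  ("richard", ["rick", "dick", "rich"]), ("michael", ["mike", "mikey"]),
  ("joseph", ["joe", "joey"]), ("thomas", ["tom", "tommy"]),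
  ("charles", ["charlie", "chuck"]), ("christopher", ["chris"]),
  ("daniel", ["dan", "danny"]), ("matthew", ["matt"]),
  ("timothy", ["tim", "timmy"]), ("stephen", ["steve"]),
  ("steven", ["steve"]), ("kenneth", ["ken", "kenny"]),
  ("ronald", ["ron", "ronnie"]), ("donald", ["don", "donnie"]),
  ("benjamin", ["ben"]), ("frederick", ["fred", "freddy"]),
  ("gerald", ["jerry"]), ("harold", ["hal", "harry"]),
  ("lawrence", ["larry"]), ("raymond", ["ray"]),
  ("patrick", ["pat"]), ("samuel", ["sam"]),
  ("katherine", ["kathy", "kate", "katie"]), ("elizabeth", ["liz", "beth"]),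
  ("margaret", ["maggie", "peggy"]), ("patricia", ["pat", "patty"]),
  ("jennifer", ["jenny", "jen"]), ("deborah", ["deb", "debbie"]),
  ("catherine", ["cathy", "cat"]), ("nancy", ["nan"]),
  ("andrew", ["andy", "drew"]), ("anthony", ["tony"]),
  ("eugene", ["gene"]), ("phillip", ["phil"]),
  ("alexander", ["alex"]), ("nicholas", ["nick"]),
  ("jonathan", ["jon"]), ("nathaniel", ["nate", "nathan"]),
  ("theodore", ["ted", "teddy"]), ("walter", ["walt"]),
  ("wesley", ["wes"]), ("douglas", ["doug"]),
  ("franklin", ["frank"]), ("francis", ["frank"]),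
  ("albert", ["al"]), ("clifford", ["cliff"]),
  ("leonard", ["len", "lenny"]), ("terrence", ["terry"]),
  ("randall", ["randy"]), ("mitchell", ["mitch"]),
  ("reginald", ["reggie"]), ("sylvester", ["sly"])]

-- the 'for formal, nicks in NICKNAMES.items(): ...' loop with its early return
def nickLoop (name1 : String) (name2 : String) : List (String × List String) → Bool
  | [] => false
  | (formal, nicks) :: rest =>
      let all_names := formal :: nicks
      if all_names.contains name1 && all_names.contains name2 then true
      else nickLoop name1 name2 rest

def first_names_match (name1 : String) (name2 : String) : Bool :=
  if name1 == name2 then true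
  else if PySem.Str.slice name1 none (some 3) == PySem.Str.slice name2 none (some 3)
          && decide (3 ≤ PySem.Str.len name1) && decide (3 ≤ PySem.Str.len name2) then true
  else nickLoop name1 name2 NICKNAMES

-- ===== PORT B =====
-- B'''s module-level literal inverted index: name -> list of ids of the nickname groups it belongs to
def NICK_INDEX : PySem.Dict String (List Int) := PySem.Dict.ofList [
  ("edward", [0]),
  ("ed", [0]),
  ("eddie", [0]),
  ("william", [1]),
  ("bill", [1]),
  ("will", [1]),
  ("billy", [1]),
  ("willy", [1]),
  ("james", [2]),
  ("jim", [2]),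
  ("jimmy", [2]),
  ("jamie", [2]),
  ("robert", [3]),
  ("bob", [3]),
  ("bobby", [3]),
  ("rob", [3]),
  ("richard", [4]),
  ("rick", [4]),
  ("dick", [4]),
  ("rich", [4]),
  ("michael", [5]),
  ("mike", [5]),
  ("mikey", [5]),
  ("joseph", [6]),
  ("joe", [6]),
  ("joey", [6]),
  ("thomas", [7]),
  ("tom", [7]),
  ("tommy", [7]),
  ("charles", [8]),
  ("charlie", [8]),
  ("chuck", [8]),
  ("christopher", [9]),
  ("chris", [9]),
  ("daniel", [10]),
  ("dan", [10]),
  ("danny", [10]),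
  ("matthew", [11]),
  ("matt", [11]),
  ("timothy", [12]),
  ("tim", [12]),
  ("timmy", [12]),
  ("stephen", [13]),
  ("steve", [13, 14]),
  ("steven", [14]),
  ("kenneth", [15]),
  ("ken", [15]),
  ("kenny", [15]),
  ("ronald", [16]),
  ("ron", [16]),
  ("ronnie", [16]),
  ("donald", [17]),
  ("don", [17]),
  ("donnie", [17]),
  ("benjamin", [18]),
  ("ben", [18]),
  ("frederick", [19]),
  ("fred", [19]),
  ("freddy", [19]),
  ("gerald", [20]),
  ("jerry", [20]),
  ("harold", [21]),
  ("hal", [21]),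
  ("harry", [21]),
  ("lawrence", [22]),
  ("larry", [22]),
  ("raymond", [23]),
  ("ray", [23]),
  ("patrick", [24]),
  ("pat", [24, 29]),
  ("samuel", [25]),
  ("sam", [25]),
  ("katherine", [26]),
  ("kathy", [26]),
  ("kate", [26]),
  ("katie", [26]),
  ("elizabeth", [27]),
  ("liz", [27]),
  ("beth", [27]),
  ("margaret", [28]),
  ("maggie", [28]),
  ("peggy", [28]),
  ("patricia", [29]),
  ("patty", [29]),
  ("jennifer", [30]),
  ("jenny", [30]),
  ("jen", [30]),
  ("deborah", [31]),
  ("deb", [31]),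
  ("debbie", [31]),
  ("catherine", [32]),
  ("cathy", [32]),
  ("cat", [32]),
  ("nancy", [33]),
  ("nan", [33]),
  ("andrew", [34]),
  ("andy", [34]),
  ("drew", [34]),
  ("anthony", [35]),
  ("tony", [35]),
  ("eugene", [36]),
  ("gene", [36]),
  ("phillip", [37]),
  ("phil", [37]),
  ("alexander", [38]),
  ("alex", [38]),
  ("nicholas", [39]),
  ("nick", [39]),
  ("jonathan", [40]),
  ("jon", [40]),
  ("nathaniel", [41]),
  ("nate", [41]),
  ("nathan", [41]),
  ("theodore", [42]),
  ("ted", [42]),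
  ("teddy", [42]),
  ("walter", [43]),
  ("walt", [43]),
  ("wesley", [44]),
  ("wes", [44]),
  ("douglas", [45]),
  ("doug", [45]),
  ("franklin", [46]),
  ("frank", [46, 47]),
  ("francis", [47]),
  ("albert", [48]),
  ("al", [48]),
  ("clifford", [49]),
  ("cliff", [49]),
  ("leonard", [50]),
  ("len", [50]),
  ("lenny", [50]),
  ("terrence", [51]),
  ("terry", [51]),
  ("randall", [52]),
  ("randy", [52]),
  ("mitchell", [53]),
  ("mitch", [53]),
  ("reginald", [54]),
  ("reggie", [54]),
  ("sylvester", [55]),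
  ("sly", [55])]

def first_names_match_alt (name1 : String) (name2 : String) : Bool :=
  let g1 := NICK_INDEX.getD name1 []
  let g2 := NICK_INDEX.getD name2 []
  (name1 == name2)
    || (decide (3 ≤ PySem.Str.len name1)
          && PySem.Str.startswith name2 (PySem.Str.slice name1 none (some 3)))
    || g1.any (fun i => g2.contains i)

-- ===== PRECONDITION & SPEC =====
def Spec_first_names_match (name1 : String) (name2 : String) (out : Bool) : Prop := out = first_names_match_alt name1 name2
instance (name1 : String) (name2 : String) (out : Bool) : Decidable (Spec_first_names_match name1 name2 out) := by unfold Spec_first_names_match; infer_instance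

-- ===== CLAIM (what is proved, stated in full; the proofs are below) =====
def Claim_equal_first_names_match : Prop := ∀ (name1 : String) (name2 : String), Dom_first_names_match name1 name2 → Spec_first_names_match name1 name2 (first_names_match name1 name2)

-- ===== LEMMAS AND PROOFS =====

-- the index B keeps as a literal is exactly the setdefault/append fold over NICKNAMES
def idxBuild : PySem.Dict String (List Int) :=
  (PySem.List.enumerate NICKNAMES 0).foldl
    (fun d p =>
      (p.2.1 :: p.2.2).foldl
        (fun d n => d.insert n (d.getD n [] ++ [p.1])) d)
    PySem.Dict.empty

set_option maxRecDepth 40000 in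
theorem NICK_INDEX_eq : NICK_INDEX = idxBuild := by decide

-- the prefix guards of A and of B are the same Bool
theorem take3_prefix_iff (l1 l2 : List Char) :
    ((l1.take 3 = l2.take 3 ∧ 3 ≤ l1.length) ∧ 3 ≤ l2.length) ↔
      (3 ≤ l1.length ∧ l1.take 3 <+: l2) := by
  constructor
  · rintro ⟨⟨h12, h1⟩, h2⟩
    refine ⟨h1, ?_⟩
    rw [h12]
    exact List.take_prefix 3 l2
  · rintro ⟨h1, hpre⟩
    have hlen : (l1.take 3).length = 3 := by simp [List.length_take]; omega
    have h2 : 3 ≤ l2.length := hlen ▸ hpre.length_le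
    have heq := List.prefix_iff_eq_take.mp hpre
    rw [hlen] at heq
    exact ⟨⟨heq, h1⟩, h2⟩

theorem guard_eq (name1 name2 : String) :
    (PySem.Str.slice name1 none (some 3) == PySem.Str.slice name2 none (some 3)
        && decide (3 ≤ PySem.Str.len name1) && decide (3 ≤ PySem.Str.len name2))
      = (decide (3 ≤ PySem.Str.len name1)
          && PySem.Str.startswith name2 (PySem.Str.slice name1 none (some 3))) := by
  have hs : ∀ l : List Char, PySem.List.slice l none (some 3) = l.take 3 := by
    intro l
    simp [pysem]
  rw [Bool.eq_iff_iff]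
  simp only [Bool.and_eq_true, beq_iff_eq, decide_eq_true_eq, PySem.Str.len_eq,
    ← String.toList_inj, PySem.Str.toList_slice, PySem.Str.startswith_eq,
    PySem.Chars.slice_eq_listSlice, PySem.Chars.startswith_iff, hs,
    Nat.ofNat_le_cast]
  exact take3_prefix_iff name1.toList name2.toList

-- inner fold of the index build: which ids a name maps to after appending id i for every name in `names`
theorem mem_innerFold (names : List String) (i : Int)
    (d : PySem.Dict String (List Int)) (n : String) (j : Int) :
    j ∈ (names.foldl (fun d m => d.insert m (d.getD m [] ++ [i])) d).getD n [] ↔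
      j ∈ d.getD n [] ∨ (j = i ∧ n ∈ names) := by
  induction names generalizing d with
  | nil => simp
  | cons m ms ih =>
      simp only [List.foldl_cons, ih, PySem.Dict.getD_insert]
      by_cases h : n = m
      · subst h
        simp
        tauto
      · simp [h]

-- outer fold: j is an id of n iff it was already, or j names a group of the remaining table containing n
theorem mem_outerFold (t : List (String × List String)) (s : Int)
    (d : PySem.Dict String (List Int)) (n : String) (j : Int) :
    j ∈ ((PySem.List.enumerate t s).foldl
          (fun d p =>
            (p.2.1 :: p.2.2).foldl (fun d m => d.insert m (d.getD m [] ++ [p.1])) d)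
          d).getD n [] ↔
      j ∈ d.getD n [] ∨
        ∃ k : Nat, ∃ _ : k < t.length, j = s + k ∧ n ∈ t[k].1 :: t[k].2 := by
  induction t generalizing s d with
  | nil => simp [PySem.List.enumerate_nil]
  | cons g gs ih =>
      rw [PySem.List.enumerate_cons, List.foldl_cons, ih]
      simp only [mem_innerFold]
      constructor
      · rintro ((h | ⟨rfl, hmem⟩) | ⟨k, hk, rfl, hmem⟩)
        · exact Or.inl h
        · exact Or.inr ⟨0, by simp, by simp, by simpa using hmem⟩
        · refine Or.inr ⟨k + 1, by simpa using hk, by push_cast; ring, by simpa using hmem⟩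
      · rintro (h | ⟨k, hk, hj, hmem⟩)
        · exact Or.inl (Or.inl h)
        · cases k with
          | zero =>
              refine Or.inl (Or.inr ⟨by simpa using hj, by simpa using hmem⟩)
          | succ k =>
              refine Or.inr ⟨k, by simpa using hk, by rw [hj]; push_cast; ring, by simpa using hmem⟩

theorem mem_NICK_INDEX (n : String) (j : Int) :
    j ∈ NICK_INDEX.getD n [] ↔
      ∃ k : Nat, ∃ _ : k < NICKNAMES.length, j = (k : Int) ∧ n ∈ NICKNAMES[k].1 :: NICKNAMES[k].2 := by
  rw [NICK_INDEX_eq, idxBuild, mem_outerFold]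
  have hempty : j ∈ (PySem.Dict.empty : PySem.Dict String (List Int)).getD n [] ↔ False := by
    simp [PySem.Dict.getD, PySem.Dict.get?, PySem.Dict.empty]
  rw [hempty, false_or]
  constructor
  · rintro ⟨k, hk, hj, hmem⟩
    exact ⟨k, hk, by simpa using hj, hmem⟩
  · rintro ⟨k, hk, hj, hmem⟩
    exact ⟨k, hk, by simpa using hj, hmem⟩

theorem nickLoop_eq_true_iff (name1 name2 : String) (t : List (String × List String)) :
    nickLoop name1 name2 t = true ↔
      ∃ k : Nat, ∃ _ : k < t.length,
        name1 ∈ t[k].1 :: t[k].2 ∧ name2 ∈ t[k].1 :: t[k].2 := by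
  induction t with
  | nil => simp [nickLoop]
  | cons g gs ih =>
      obtain ⟨f, nicks⟩ := g
      rw [show nickLoop name1 name2 ((f, nicks) :: gs) =
            (if (f :: nicks).contains name1 && (f :: nicks).contains name2 then true
             else nickLoop name1 name2 gs) from rfl]
      by_cases h : ((f :: nicks).contains name1 && (f :: nicks).contains name2) = true
      · rw [if_pos h]
        simp only [Bool.and_eq_true, List.contains_eq_mem, decide_eq_true_eq] at h
        simp only [true_iff]
        exact ⟨0, by simp, by simpa using h.1, by simpa using h.2⟩
      · rw [if_neg h, ih]
        constructor
        · rintro ⟨k, hk, h1, h2⟩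
          exact ⟨k + 1, by simpa using hk, by simpa using h1, by simpa using h2⟩
        · rintro ⟨k, hk, h1, h2⟩
          cases k with
          | zero =>
              exfalso
              apply h
              simp only [Bool.and_eq_true, List.contains_eq_mem, decide_eq_true_eq]
              exact ⟨by simpa using h1, by simpa using h2⟩
          | succ k =>
              exact ⟨k, by simpa using hk, by simpa using h1, by simpa using h2⟩

-- A'''s table scan equals B'''s intersection test on the index lookups
theorem nickLoop_eq_index (name1 name2 : String) :
    nickLoop name1 name2 NICKNAMES =
      (NICK_INDEX.getD name1 []).any (fun i => (NICK_INDEX.getD name2 []).contains i) := by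
  rw [Bool.eq_iff_iff, nickLoop_eq_true_iff]
  simp only [List.any_eq_true, List.contains_eq_mem, decide_eq_true_eq]
  constructor
  · rintro ⟨k, hk, h1, h2⟩
    exact ⟨(k : Int), (mem_NICK_INDEX _ _).2 ⟨k, hk, rfl, h1⟩,
      (mem_NICK_INDEX _ _).2 ⟨k, hk, rfl, h2⟩⟩
  · rintro ⟨x, hx1, hx2⟩
    obtain ⟨k1, hk1, hxk1, h1⟩ := (mem_NICK_INDEX _ _).1 hx1
    obtain ⟨k2, hk2, hxk2, h2⟩ := (mem_NICK_INDEX _ _).1 hx2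
    have hk2k : k2 = k1 := by omega
    exact ⟨k1, hk1, h1, hk2k ▸ h2⟩

-- ===== VERDICT (by name: the statement is the Claim_ definition above) =====
theorem first_names_match_spec : Claim_equal_first_names_match := by
  intro name1 name2 _
  unfold Spec_first_names_match first_names_match first_names_match_alt
  rw [guard_eq, nickLoop_eq_index]
  have hshape : ∀ (a b r : Bool),
      (if a then true else if b then true else r) = (a || (b || r)) := by decide
  simp only [hshape, Bool.or_assoc]
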